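-- pv_equiv track=rewrite | github.com/UlsanCollege-English/week-7-moonlight-festival-control-booth-s4mir1 | src/challenges.py | order_festival_alerts
-- ===== SOURCE A (Python) =====
-- import heapq
--
-- def order_festival_alerts(alerts: list[tuple[int, str]]) -> list[str]:
--     """
--     Return alert titles in the order they should be handled.
--
--     Each alert is a tuple:
--         (priority, title)
--
--     Smaller priority numbers should be handled first.
--
--     Args:
--         alerts: A list of (priority, title) tuples.
--
--     Returns:
--         A list of alert titles sorted from most urgent to least urgent.
--
--     Time complexity:  O(n log n) — heapify is O(n), each of the n pops is O(log n).
--     Space complexity: O(n) for the copied heap.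
--     """
--     heap = alerts.copy()          # avoid mutating caller's list
--     heapq.heapify(heap)           # O(n) in-place min-heap
--     result = []
--     while heap:
--         _, title = heapq.heappop(heap)   # O(log n)
--         result.append(title)
--     return result
-- ===== SOURCE B (Python) =====
-- def order_festival_alerts(alerts: list[tuple[int, str]]) -> list[str]:
--     """Sort the (priority, title) tuples once with Timsort and project the titles."""
--     return [title for _, title in sorted(alerts)]
-- ===== Notes on version B (the rewrite author's own statement) =====
-- stated objective: idiomatic
-- what changed: Replaces the heapify-then-pop-n-times loop with a single built-in sort of the whole list followed by a title projection; the explicit heap and the pop loop disappear.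
import Mathlib
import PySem

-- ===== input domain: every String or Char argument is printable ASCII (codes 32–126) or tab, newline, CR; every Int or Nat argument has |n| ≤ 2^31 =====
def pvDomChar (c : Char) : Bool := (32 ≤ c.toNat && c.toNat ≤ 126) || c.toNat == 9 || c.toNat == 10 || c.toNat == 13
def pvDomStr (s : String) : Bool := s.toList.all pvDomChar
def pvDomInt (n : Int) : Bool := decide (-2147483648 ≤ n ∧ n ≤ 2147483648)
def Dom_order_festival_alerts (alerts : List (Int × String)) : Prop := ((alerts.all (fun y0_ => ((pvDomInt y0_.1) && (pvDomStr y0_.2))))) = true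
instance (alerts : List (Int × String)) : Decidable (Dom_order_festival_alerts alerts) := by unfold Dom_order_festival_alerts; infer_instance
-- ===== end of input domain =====

-- B drops the heapify-then-pop loop of A for one built-in sort plus a title projection (idiomatic; same asymptotic cost).

-- ===== PORT A =====
-- Python's `<` on (int, str) tuples: lexicographic.
def pyTupLt (a b : Int × String) : Bool :=
  decide (a.1 < b.1) || (decide (a.1 = b.1) && decide (a.2 < b.2))

-- heapq's pop of the heap root: a smallest element of x :: xs under tuple `<`
-- (the first minimal one; exact, because tuples tied under the order are identical)
def selMin (x : Int × String) (xs : List (Int × String)) : Int × String :=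
  xs.foldl (fun m y => if pyTupLt y m then y else m) x

-- termination helper for the pop loop: the selected minimum is an element of the heap
theorem selMin_mem (x : Int × String) (xs : List (Int × String)) : selMin x xs ∈ x :: xs := by
  unfold selMin
  induction xs generalizing x with
  | nil => simp
  | cons y ys ih =>
    simp only [List.foldl]
    have h := ih (if pyTupLt y x then y else x)
    rcases List.mem_cons.mp h with h | h
    · by_cases hc : pyTupLt y x = true <;> simp [hc] at h ⊢ <;> tauto
    · simp [h]

-- heapq.heapify / heappop are CPython stdlib calls, ported by their contract: while the
-- heap is nonempty, heappop removes and returns a smallest element under tuple `<`.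
def popMinLoop : List (Int × String) → List String
  | [] => []
  | x :: xs => (selMin x xs).2 :: popMinLoop ((x :: xs).erase (selMin x xs))
termination_by l => l.length
decreasing_by
  have h2 := List.length_erase_of_mem (selMin_mem x xs)
  simp only [List.length_cons] at *
  omega

def order_festival_alerts (alerts : List (Int × String)) : List String :=
  -- heap = alerts.copy(); heapq.heapify(heap); result = []; while heap: pop, append title
  popMinLoop alerts

-- ===== PORT B =====
def order_festival_alerts_alt (alerts : List (Int × String)) : List String :=
  -- [title for _, title in sorted(alerts)]
  (PySem.List.sorted2 alerts Prod.fst Prod.snd false).map Prod.snd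

-- ===== PRECONDITION & SPEC =====
def Spec_order_festival_alerts (alerts : List (Int × String)) (out : List String) : Prop := out = order_festival_alerts_alt alerts
instance (alerts : List (Int × String)) (out : List String) : Decidable (Spec_order_festival_alerts alerts out) := by unfold Spec_order_festival_alerts; infer_instance

-- ===== CLAIM (what is proved, stated in full; the proofs are below) =====
def Claim_equal_order_festival_alerts : Prop := ∀ (alerts : List (Int × String)), Dom_order_festival_alerts alerts → Spec_order_festival_alerts alerts (order_festival_alerts alerts)

-- ===== LEMMAS AND PROOFS =====

-- the weak lexicographic order both programs arrange the pairs by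
def lexR (a b : Int × String) : Prop := a.1 < b.1 ∨ (a.1 = b.1 ∧ a.2 ≤ b.2)

theorem lexR_antisymm {a b : Int × String} (h1 : lexR a b) (h2 : lexR b a) : a = b := by
  obtain ⟨a1, a2⟩ := a; obtain ⟨b1, b2⟩ := b
  simp only [lexR] at h1 h2
  rcases h1 with h1 | ⟨e1, l1⟩ <;> rcases h2 with h2 | ⟨e2, l2⟩
  · exact absurd (h1.trans h2) (lt_irrefl _)
  · exact absurd h1 (by simp_all)
  · exact absurd h2 (by simp_all)
  · exact Prod.ext e1 (le_antisymm l1 l2)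

theorem lexR_trans {a b c : Int × String} (h1 : lexR a b) (h2 : lexR b c) : lexR a c := by
  unfold lexR at *
  rcases h1 with h1 | ⟨e1, l1⟩ <;> rcases h2 with h2 | ⟨e2, l2⟩
  · exact Or.inl (h1.trans h2)
  · exact Or.inl (by omega)
  · exact Or.inl (by omega)
  · exact Or.inr ⟨by omega, l1.trans l2⟩

theorem lexR_refl (a : Int × String) : lexR a a := Or.inr ⟨rfl, le_refl _⟩

theorem lexR_of_pyTupLt {a b : Int × String} (h : pyTupLt a b = true) : lexR a b := by
  simp only [pyTupLt, Bool.or_eq_true, Bool.and_eq_true, decide_eq_true_eq] at h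
  rcases h with h | ⟨h, h'⟩
  · exact Or.inl h
  · exact Or.inr ⟨h, le_of_lt h'⟩

theorem lexR_of_not_pyTupLt {a b : Int × String} (h : pyTupLt a b = false) : lexR b a := by
  simp only [pyTupLt, Bool.or_eq_false_iff, Bool.and_eq_false_iff,
    decide_eq_false_iff_not, not_lt] at h
  obtain ⟨h1, h2⟩ := h
  unfold lexR
  rcases h2 with h2 | h2
  · exact Or.inl (lt_of_le_of_ne h1 (fun e => h2 e.symm))
  · rcases eq_or_lt_of_le h1 with e | l
    · exact Or.inr ⟨e, h2⟩
    · exact Or.inl l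

-- the selection fold returns a lexR-minimum of x :: xs
theorem selMin_min (x : Int × String) (xs : List (Int × String)) :
    ∀ y ∈ x :: xs, lexR (selMin x xs) y := by
  unfold selMin
  induction xs generalizing x with
  | nil =>
    intro y hy
    simp at hy
    subst hy
    exact lexR_refl _
  | cons z zs ih =>
    intro y hy
    simp only [List.foldl]
    by_cases hc : pyTupLt z x = true
    · simp only [if_pos hc]
      have hb := ih z
      rcases List.mem_cons.mp hy with rfl | hy'
      · exact lexR_trans (hb z List.mem_cons_self) (lexR_of_pyTupLt hc)
      · rcases List.mem_cons.mp hy' with rfl | hy''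
        · exact hb y List.mem_cons_self
        · exact hb y (List.mem_cons_of_mem _ hy'')
    · simp only [if_neg hc]
      have hb := ih x
      have hcf : pyTupLt z x = false := by simpa using hc
      rcases List.mem_cons.mp hy with rfl | hy'
      · exact hb y List.mem_cons_self
      · rcases List.mem_cons.mp hy' with rfl | hy''
        · exact lexR_trans (hb x List.mem_cons_self) (lexR_of_not_pyTupLt hcf)
        · exact hb y (List.mem_cons_of_mem _ hy'')

-- the sequence of popped PAIRS (proof-side shadow of popMinLoop)
def popSeq : List (Int × String) → List (Int × String)
  | [] => []
  | x :: xs => selMin x xs :: popSeq ((x :: xs).erase (selMin x xs))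
termination_by l => l.length
decreasing_by
  have h2 := List.length_erase_of_mem (selMin_mem x xs)
  simp only [List.length_cons] at *
  omega

theorem popMinLoop_eq_map (xs : List (Int × String)) :
    popMinLoop xs = (popSeq xs).map Prod.snd := by
  induction xs using popSeq.induct with
  | case1 => simp [popMinLoop, popSeq]
  | case2 x xs ih => rw [popMinLoop, popSeq, List.map_cons, ih]

theorem popSeq_perm (xs : List (Int × String)) : (popSeq xs).Perm xs := by
  induction xs using popSeq.induct with
  | case1 => simp [popSeq]
  | case2 x xs ih =>
    rw [popSeq]
    exact ((ih.cons (selMin x xs)).trans (List.perm_cons_erase (selMin_mem x xs)).symm)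

theorem popSeq_pairwise (xs : List (Int × String)) : (popSeq xs).Pairwise lexR := by
  induction xs using popSeq.induct with
  | case1 => simp [popSeq]
  | case2 x xs ih =>
    rw [popSeq]
    refine List.Pairwise.cons ?_ ih
    intro z hz
    have hz' : z ∈ (x :: xs).erase (selMin x xs) := (popSeq_perm _).mem_iff.mp hz
    exact selMin_min x xs z (List.erase_subset hz')

-- the strict comparison PySem.List.sorted2 uses for keys (Prod.fst, Prod.snd)
def sBefore (a b : Int × String) : Bool :=
  decide (a.1 < b.1) || (!decide (b.1 < a.1) && decide (a.2 < b.2))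

theorem sBefore_false_iff {a b : Int × String} : sBefore b a = false ↔ lexR a b := by
  simp only [sBefore, lexR, Bool.or_eq_false_iff, Bool.and_eq_false_iff,
    decide_eq_false_iff_not, Bool.not_eq_false', decide_eq_true_eq, not_lt]
  constructor
  · rintro ⟨h1, h2 | h2⟩
    · exact Or.inl h2
    · rcases lt_or_eq_of_le h1 with h | h
      · exact Or.inl h
      · exact Or.inr ⟨h, h2⟩
  · rintro (h | ⟨h, h'⟩)
    · exact ⟨le_of_lt h, Or.inl h⟩
    · exact ⟨le_of_eq h, Or.inr h'⟩

theorem sBefore_asymm {a b : Int × String} (h : sBefore a b = true) : sBefore b a = false := by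
  simp only [sBefore, Bool.or_eq_true, Bool.and_eq_true, Bool.not_eq_true',
    decide_eq_true_eq, decide_eq_false_iff_not, not_lt] at h
  simp only [sBefore, Bool.or_eq_false_iff, Bool.and_eq_false_iff,
    decide_eq_false_iff_not, Bool.not_eq_false', decide_eq_true_eq, not_lt]
  rcases h with h | ⟨h1, h2⟩
  · exact ⟨le_of_lt h, Or.inl h⟩
  · exact ⟨h1, Or.inr (le_of_lt h2)⟩

theorem sBefore_trans {a b c : Int × String} (h1 : sBefore a b = true) (h2 : sBefore b c = true) :
    sBefore a c = true := by
  simp only [sBefore, Bool.or_eq_true, Bool.and_eq_true, Bool.not_eq_true',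
    decide_eq_true_eq, decide_eq_false_iff_not, not_lt] at h1 h2 ⊢
  rcases h1 with h1 | ⟨h1, h1'⟩ <;> rcases h2 with h2 | ⟨h2, h2'⟩
  · exact Or.inl (h1.trans h2)
  · exact Or.inl (lt_of_lt_of_le h1 h2)
  · exact Or.inl (lt_of_le_of_lt h1 h2)
  · exact Or.inr ⟨h1.trans h2, h1'.trans h2'⟩

-- insertion by sBefore preserves Pairwise lexR
theorem insertBy_pairwise (x : Int × String) (ys : List (Int × String))
    (h : ys.Pairwise lexR) : (PySem.List.insertBy sBefore x ys).Pairwise lexR := by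
  induction ys with
  | nil => simp [PySem.List.insertBy]
  | cons y ys ih =>
    obtain ⟨hy, hys⟩ := List.pairwise_cons.mp h
    rw [PySem.List.insertBy]
    split
    case isTrue hb =>
      refine List.Pairwise.cons ?_ h
      intro z hz
      rcases List.mem_cons.mp hz with rfl | hz'
      · exact sBefore_false_iff.mp (sBefore_asymm hb)
      · refine sBefore_false_iff.mp ?_
        cases hzx : sBefore z x with
        | false => rfl
        | true =>
          have : sBefore z y = true := sBefore_trans hzx hb
          rw [sBefore_false_iff.mpr (hy z hz')] at this
          cases this
    case isFalse hb =>
      have hb' : sBefore x y = false := by simpa using hb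
      refine List.Pairwise.cons ?_ (ih hys)
      intro z hz
      rcases (PySem.List.mem_insertBy sBefore x z ys).mp hz with rfl | hz'
      · exact sBefore_false_iff.mp hb'
      · exact hy z hz'

theorem sorted2_pairwise (xs : List (Int × String)) :
    (PySem.List.sorted2 xs Prod.fst Prod.snd false).Pairwise lexR := by
  have gen : ∀ (l acc : List (Int × String)), acc.Pairwise lexR →
      (l.foldl (fun acc x => PySem.List.insertBy sBefore x acc) acc).Pairwise lexR := by
    intro l
    induction l with
    | nil => intro acc h; simpa using h
    | cons x l ihl => intro acc h; exact ihl _ (insertBy_pairwise x acc h)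
  exact gen xs [] List.Pairwise.nil

theorem popSeq_eq_sorted2 (xs : List (Int × String)) :
    popSeq xs = PySem.List.sorted2 xs Prod.fst Prod.snd false := by
  exact List.Perm.eq_of_pairwise (fun a b _ _ h1 h2 => lexR_antisymm h1 h2)
    (popSeq_pairwise xs) (sorted2_pairwise xs)
    ((popSeq_perm xs).trans (PySem.List.sorted2_perm xs Prod.fst Prod.snd false).symm)

-- ===== VERDICT (by name: the statement is the Claim_ definition above) =====
theorem order_festival_alerts_spec : Claim_equal_order_festival_alerts := by
  intro alerts _
  unfold Spec_order_festival_alerts order_festival_alerts order_festival_alerts_alt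
  rw [popMinLoop_eq_map, popSeq_eq_sorted2]
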